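-- pv_equiv track=rewrite | github.com/KarseladzeBTU/Utility-tool | utils/main_64.py | base64_to_utf8
-- ===== SOURCE A (Python) =====
-- BASE64 = "ABCDEFGHIJKLMNOPQRSTUVWXYZabcdefghijklmnopqrstuvwxyz0123456789+/"
--
-- def base64_to_utf8(base64_text):
--     base64_text = base64_text.rstrip('=')
--     binary_string = ''.join(f"{BASE64.index(char):06b}" for char in base64_text)
--     padding = len(binary_string) % 8
--     binary_string = binary_string[:len(binary_string) - padding]
--     eight_bit_chunks = [binary_string[i:i+8] for i in range(0, len(binary_string), 8)]
--     utf8_bytes = bytes(int(chunk, 2) for chunk in eight_bit_chunks)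
--     utf8_string = utf8_bytes.decode('utf-8')
--
--     return utf8_string
-- ===== SOURCE B (Python) =====
-- BASE64 = "ABCDEFGHIJKLMNOPQRSTUVWXYZabcdefghijklmnopqrstuvwxyz0123456789+/"
--
-- def base64_to_utf8(base64_text):
--     out = bytearray()
--     acc = 0
--     nbits = 0
--     for ch in base64_text.rstrip('='):
--         acc = acc * 64 + BASE64.index(ch)
--         nbits += 6
--         if nbits >= 8:
--             nbits -= 8
--             out.append(acc >> nbits)
--             acc &= (1 << nbits) - 1
--     return bytes(out).decode('utf-8')
-- ===== Notes on version B (the rewrite author's own statement) =====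
-- stated objective: alternative
-- what changed: B is a single streaming pass with a 6-bit accumulator (acc, nbits) that emits a byte by shift/mask whenever 8 bits are buffered, instead of A's staged pipeline that builds a binary-text string, truncates it and re-parses 8-character chunks with int(chunk, 2); an incomplete final byte is never emitted, reproducing A's truncation of the bit stream.
import Mathlib
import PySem

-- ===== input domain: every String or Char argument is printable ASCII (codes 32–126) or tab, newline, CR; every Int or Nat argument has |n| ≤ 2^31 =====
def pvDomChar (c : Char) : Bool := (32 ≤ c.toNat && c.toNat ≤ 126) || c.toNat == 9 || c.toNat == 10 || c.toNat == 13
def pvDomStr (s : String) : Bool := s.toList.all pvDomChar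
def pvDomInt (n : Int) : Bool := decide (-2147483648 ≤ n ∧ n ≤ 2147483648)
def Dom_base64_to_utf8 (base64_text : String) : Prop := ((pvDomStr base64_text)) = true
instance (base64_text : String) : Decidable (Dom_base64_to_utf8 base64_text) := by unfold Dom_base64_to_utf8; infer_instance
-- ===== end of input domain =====

-- B replaces A's staged pipeline (build a binary-text character string, truncate it, re-parse the
-- 8-char chunks with int(chunk, 2)) by ONE streaming pass with a 6-bit accumulator (acc, nbits)
-- that emits a byte by shift/mask whenever 8 bits are buffered; an incomplete final byte
-- is never emitted, which reproduces A's truncation of the bit stream.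

-- shared module constant: the BASE64 alphabet of Source A
def B64 : List Char := "ABCDEFGHIJKLMNOPQRSTUVWXYZabcdefghijklmnopqrstuvwxyz0123456789+/".toList

-- A-side hand port of str.rstrip('='): drop the padding characters at the end (exact)
def rstripEq (cs : List Char) : List Char := (cs.reverse.dropWhile (· == '=')).reverse

-- shared hand port of bytes.decode('utf-8') (strict), exact on lists of bytes < 256: rejects bad
-- continuation bytes, overlong forms, surrogates and code points > 0x10FFFF like CPython;
-- `none` = UnicodeDecodeError (excluded by Pre_).
def utf8Decode? : List Nat → Option (List Char)
  | [] => some []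
  | b :: r =>
    if b < 0x80 then (utf8Decode? r).map (Char.ofNat b :: ·)
    else if 0xC2 ≤ b ∧ b ≤ 0xDF then
      match r with
      | c1 :: r' =>
        if 0x80 ≤ c1 ∧ c1 ≤ 0xBF then
          (utf8Decode? r').map (Char.ofNat ((b - 0xC0) * 64 + (c1 - 0x80)) :: ·)
        else none
      | _ => none
    else if 0xE0 ≤ b ∧ b ≤ 0xEF then
      match r with
      | c1 :: c2 :: r' =>
        if (if b = 0xE0 then 0xA0 else 0x80) ≤ c1 ∧ c1 ≤ (if b = 0xED then 0x9F else 0xBF) ∧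
            0x80 ≤ c2 ∧ c2 ≤ 0xBF then
          (utf8Decode? r').map (Char.ofNat ((b - 0xE0) * 4096 + (c1 - 0x80) * 64 + (c2 - 0x80)) :: ·)
        else none
      | _ => none
    else if 0xF0 ≤ b ∧ b ≤ 0xF4 then
      match r with
      | c1 :: c2 :: c3 :: r' =>
        if (if b = 0xF0 then 0x90 else 0x80) ≤ c1 ∧ c1 ≤ (if b = 0xF4 then 0x8F else 0xBF) ∧
            0x80 ≤ c2 ∧ c2 ≤ 0xBF ∧ 0x80 ≤ c3 ∧ c3 ≤ 0xBF then
          (utf8Decode? r').map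
            (Char.ofNat ((b - 0xF0) * 262144 + (c1 - 0x80) * 4096 + (c2 - 0x80) * 64 + (c3 - 0x80)) :: ·)
        else none
      | _ => none
    else none

-- ===== PORT A =====
-- A: binary-text char list via f"{BASE64.index(char):06b}" (= format(·,'b') zero-filled to 6),
-- truncate to a multiple of 8, parse the 8-char chunks with int(chunk, 2), decode.
-- `.getD _` stands where Python raises (ValueError from .index, UnicodeDecodeError from
-- .decode — both excluded by Pre_; int(chunk, 2) always succeeds on these chunks).
def base64_to_utf8 (base64_text : String) : String :=
  let t := rstripEq base64_text.toList
  let binary_string : List Char :=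
    (t.map (fun ch =>
      PySem.Chars.zfill (PySem.Int.toBinChars (((PySem.List.index? B64 ch).getD 0 : Nat) : Int)) 6)).flatten
  let padding : Nat := binary_string.length % 8
  let binary2 := PySem.List.slice binary_string none (some ((binary_string.length : Int) - (padding : Int)))
  let chunks := (PySem.List.pyRange 0 (binary2.length : Int) 8).map
    (fun i => PySem.List.slice binary2 (some i) (some (i + 8)))
  let bytes := chunks.map (fun ch => ((PySem.Int.ofCharsBase? ch 2).getD 0).toNat)
  String.ofList ((utf8Decode? bytes).getD [])

-- ===== PORT B =====
-- B's loop body: acc = acc*64 + BASE64.index(ch); nbits += 6; if nbits >= 8: nbits -= 8,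
-- append(acc >> nbits), acc &= (1 << nbits) - 1.  On non-negative ints `>>`/`&(2^k-1)` are
-- `/`/`%` by 2^k — exact.  The `match … | none => 0` stands where Python's .index raises
-- ValueError (excluded by Pre_).
def bstep (st : Nat × Nat × List Nat) (v : Nat) : Nat × Nat × List Nat :=
  let acc := st.1 * 64 + v
  let nbits := st.2.1 + 6
  if 8 ≤ nbits then
    (acc % 2 ^ (nbits - 8), nbits - 8, st.2.2 ++ [acc / 2 ^ (nbits - 8)])
  else (acc, nbits, st.2.2)

def base64_to_utf8_alt (base64_text : String) : String :=
  let stripped := (base64_text.toList.reverse.dropWhile (· == '=')).reverse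
  let fin := stripped.foldl
    (fun st ch => bstep st (match PySem.List.index? B64 ch with | some v => v | none => 0))
    (0, 0, [])
  String.ofList ((utf8Decode? fin.2.2).getD [])

-- ===== PRECONDITION & SPEC =====
-- specification-side byte stream used only to STATE Pre_: the concatenated big-endian 6-bit
-- stream of the sextets, regrouped into whole bytes (incomplete trailing bits dropped)
def bits6 (v : Nat) : List Bool :=
  [decide (v / 32 % 2 = 1), decide (v / 16 % 2 = 1), decide (v / 8 % 2 = 1),
   decide (v / 4 % 2 = 1), decide (v / 2 % 2 = 1), decide (v % 2 = 1)]

def byteOf (bs : List Bool) : Nat := bs.foldl (fun a b => 2 * a + (if b then 1 else 0)) 0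

def chunk8 : List Bool → List Nat
  | b0 :: b1 :: b2 :: b3 :: b4 :: b5 :: b6 :: b7 :: r =>
    byteOf [b0, b1, b2, b3, b4, b5, b6, b7] :: chunk8 r
  | _ => []

def specBytes (vals : List Nat) : List Nat := chunk8 (vals.flatMap bits6)

-- the UTF-8 grammar (RFC 3629 byte-range table) as a Boolean shape condition on the byte list;
-- used only to STATE Pre_ (it computes no decoded value)
def validUtf8 : List Nat → Bool
  | [] => true
  | b :: r =>
    if b < 0x80 then validUtf8 r
    else if 0xC2 ≤ b ∧ b ≤ 0xDF then
      match r with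
      | c1 :: r' => (decide (0x80 ≤ c1 ∧ c1 ≤ 0xBF)) && validUtf8 r'
      | _ => false
    else if 0xE0 ≤ b ∧ b ≤ 0xEF then
      match r with
      | c1 :: c2 :: r' =>
        (decide ((if b = 0xE0 then 0xA0 else 0x80) ≤ c1 ∧ c1 ≤ (if b = 0xED then 0x9F else 0xBF) ∧
          0x80 ≤ c2 ∧ c2 ≤ 0xBF)) && validUtf8 r'
      | _ => false
    else if 0xF0 ≤ b ∧ b ≤ 0xF4 then
      match r with
      | c1 :: c2 :: c3 :: r' =>
        (decide ((if b = 0xF0 then 0x90 else 0x80) ≤ c1 ∧ c1 ≤ (if b = 0xF4 then 0x8F else 0xBF) ∧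
          0x80 ≤ c2 ∧ c2 ≤ 0xBF ∧ 0x80 ≤ c3 ∧ c3 ≤ 0xBF)) && validUtf8 r'
      | _ => false
    else false

-- Pre_: exactly the inputs on which the Python A returns — every character left after the
-- trailing padding is stripped is in the BASE64 alphabet (else .index raises ValueError) and the byte stream is
-- valid UTF-8 (else .decode raises UnicodeDecodeError)
def Pre_base64_to_utf8 (base64_text : String) : Prop :=
  (rstripEq base64_text.toList).all (B64.contains ·) = true ∧
  validUtf8 (specBytes ((rstripEq base64_text.toList).map
      (fun c => (PySem.List.index? B64 c).getD 0))) = true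

instance (base64_text : String) : Decidable (Pre_base64_to_utf8 base64_text) := by
  unfold Pre_base64_to_utf8; infer_instance

def pvWitness_base64_to_utf8 : String := "aGk="

def Spec_base64_to_utf8 (base64_text : String) (out : String) : Prop := out = base64_to_utf8_alt base64_text
instance (base64_text : String) (out : String) : Decidable (Spec_base64_to_utf8 base64_text out) := by unfold Spec_base64_to_utf8; infer_instance

-- ===== CLAIM (what is proved, stated in full; the proofs are below) =====
def Claim_equal_base64_to_utf8 : Prop := ∀ (base64_text : String), Dom_base64_to_utf8 base64_text → Pre_base64_to_utf8 base64_text → Spec_base64_to_utf8 base64_text (base64_to_utf8 base64_text)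

-- ===== LEMMAS AND PROOFS =====

def bitChar (b : Bool) : Char := if b then '1' else '0'

-- the n low bits of a number, big-endian
def natBits : Nat → Nat → List Bool
  | 0, _ => []
  | n + 1, a => decide (a / 2 ^ n % 2 = 1) :: natBits n a

theorem natBits_length (n a : Nat) : (natBits n a).length = n := by
  induction n generalizing a with
  | zero => rfl
  | succ n ih => simp [natBits, ih]

theorem natBits_congr (n : Nat) : ∀ (a b : Nat), a % 2 ^ n = b % 2 ^ n → natBits n a = natBits n b := by
  induction n with
  | zero => intro a b _; rfl
  | succ n ih =>
    intro a b h
    have hd : a / 2 ^ n % 2 = b / 2 ^ n % 2 := by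
      rw [← Nat.mod_mul_right_div_self a (2 ^ n) 2, ← Nat.mod_mul_right_div_self b (2 ^ n) 2,
        ← pow_succ, h]
    have ht : a % 2 ^ n = b % 2 ^ n := by
      have := congrArg (· % 2 ^ n) h
      simpa [Nat.mod_mod_of_dvd _ (pow_dvd_pow 2 (Nat.le_succ n))] using this
    simp [natBits, hd, ih a b ht]

-- any index value used by the ports is < 64 (a real index is < |B64| = 64, the fallback is 0)
theorem idx_lt (c : Char) : (PySem.List.index? B64 c).getD 0 < 64 := by
  cases h : PySem.List.index? B64 c with
  | none => simp
  | some k =>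
    rw [PySem.List.index?_eq_some_iff] at h
    obtain ⟨pre, suf, hb, hk, -⟩ := h
    have h64 : B64.length = 64 := by decide
    simp only [hb, List.length_append, List.length_cons] at h64
    simp only [Option.getD_some]
    omega

theorem chunk8_short (l : List Bool) (h : l.length < 8) : chunk8 l = [] := by
  fun_induction chunk8 l with
  | case1 b0 b1 b2 b3 b4 b5 b6 b7 r ih => simp only [List.length_cons] at h; omega
  | case2 => rfl

theorem matchIdx (c : Char) :
    (match PySem.List.index? B64 c with | some v => v | none => 0) =
      (PySem.List.index? B64 c).getD 0 := by
  cases PySem.List.index? B64 c <;> rfl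

-- gluing two bit fields: the (n+m)-bit view of a*2^m+b splits into the n-bit and m-bit views
theorem natBits_add (n m a b : Nat) (hb : b < 2 ^ m) :
    natBits (n + m) (a * 2 ^ m + b) = natBits n a ++ natBits m b := by
  induction n with
  | zero =>
    rw [Nat.zero_add, natBits, List.nil_append]
    exact natBits_congr m _ _ (by rw [Nat.add_comm, Nat.add_mul_mod_self_right])
  | succ n ih =>
    rw [show n + 1 + m = (n + m) + 1 from by omega, natBits, natBits, List.cons_append, ih]
    congr 2
    rw [pow_add, Nat.mul_comm (2 ^ n) (2 ^ m), ← Nat.div_div_eq_div_mul,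
      Nat.add_comm (a * 2 ^ m) b, Nat.add_mul_div_right _ _ (Nat.two_pow_pos m),
      Nat.div_eq_of_lt hb, Nat.zero_add]

-- bits6 is the 6-bit view
theorem bits6_natBits (v : Nat) : bits6 v = natBits 6 v := by
  simp only [bits6, natBits]
  norm_num

-- folding 0/1 bits back into a number
theorem foldl_natBits (n : Nat) : ∀ (a i : Nat),
    (natBits n a).foldl (fun x b => 2 * x + (if b then 1 else 0)) i = i * 2 ^ n + a % 2 ^ n := by
  induction n with
  | zero => intro a i; simp [natBits, Nat.mod_one]
  | succ n ih =>
    intro a i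
    rw [natBits, List.foldl_cons, ih]
    have hb : (if decide (a / 2 ^ n % 2 = 1) then (1:Nat) else 0) = a / 2 ^ n % 2 := by
      rcases Nat.mod_two_eq_zero_or_one (a / 2 ^ n) with h | h <;> simp [h]
    have hm : a % 2 ^ (n + 1) = a % 2 ^ n + 2 ^ n * (a / 2 ^ n % 2) := by
      rw [pow_succ, Nat.mod_mul]
    rw [hb, hm, pow_succ]
    ring

theorem byteOf_natBits (x : Nat) (hx : x < 256) : byteOf (natBits 8 x) = x := by
  rw [byteOf, foldl_natBits 8 x 0, Nat.zero_mul, Nat.zero_add, Nat.mod_eq_of_lt (by norm_num [hx])]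

-- chunk8 splits off 8 bits at a time
theorem chunk8_append (u r : List Bool) (hu : u.length = 8) :
    chunk8 (u ++ r) = byteOf u :: chunk8 r := by
  rcases u with _ | ⟨b0, _ | ⟨b1, _ | ⟨b2, _ | ⟨b3, _ | ⟨b4, _ | ⟨b5, _ | ⟨b6, _ | ⟨b7, u⟩⟩⟩⟩⟩⟩⟩⟩ <;>
    simp_all [chunk8]

-- B's accumulator loop emits exactly the bit-stream bytes: the out-component of the fold is the
-- previous out followed by the whole 8-bit chunks of (buffered bits ++ the sextets' bit stream)
theorem fold_spec (vals : List Nat) (h : ∀ v ∈ vals, v < 64) :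
    ∀ (acc nbits : Nat) (out : List Nat), acc < 2 ^ nbits → nbits < 8 →
      (vals.foldl bstep (acc, nbits, out)).2.2 =
        out ++ chunk8 (natBits nbits acc ++ vals.flatMap bits6) := by
  induction vals with
  | nil =>
    intro acc nbits out hacc hn
    rw [List.foldl_nil, List.flatMap_nil, List.append_nil,
      chunk8_short _ (by rw [natBits_length]; omega), List.append_nil]
  | cons v vs ih =>
    intro acc nbits out hacc hn
    have hv : v < 64 := h v (by simp)
    have h' : ∀ w ∈ vs, w < 64 := fun w hw => h w (by simp [hw])
    have hglue : natBits nbits acc ++ bits6 v = natBits (nbits + 6) (acc * 64 + v) := by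
      rw [bits6_natBits, ← natBits_add nbits 6 acc v (by omega), show (2:Nat)^6 = 64 from by norm_num]
    rw [List.foldl_cons, List.flatMap_cons, ← List.append_assoc, hglue]
    have hlt : acc * 64 + v < 2 ^ (nbits + 6) := by
      have : 2 ^ nbits * 64 ≤ 2 ^ (nbits + 6) := by rw [pow_add]; norm_num
      omega
    by_cases hc : 2 ≤ nbits
    · -- a byte is emitted
      have hstep : bstep (acc, nbits, out) v =
          ((acc * 64 + v) % 2 ^ (nbits - 2), nbits - 2, out ++ [(acc * 64 + v) / 2 ^ (nbits - 2)]) := by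
        simp only [bstep]
        rw [if_pos (by omega), show nbits + 6 - 8 = nbits - 2 from by omega]
      have hsplit : natBits (nbits + 6) (acc * 64 + v) =
          natBits 8 ((acc * 64 + v) / 2 ^ (nbits - 2)) ++
            natBits (nbits - 2) ((acc * 64 + v) % 2 ^ (nbits - 2)) := by
        rw [← natBits_add 8 (nbits - 2) _ _ (Nat.mod_lt _ (Nat.two_pow_pos _)),
          show (acc * 64 + v) / 2 ^ (nbits - 2) * 2 ^ (nbits - 2) + (acc * 64 + v) % 2 ^ (nbits - 2)
            = acc * 64 + v from by rw [Nat.mul_comm, Nat.div_add_mod],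
          show 8 + (nbits - 2) = nbits + 6 from by omega]
      have hq : (acc * 64 + v) / 2 ^ (nbits - 2) < 256 := by
        rw [Nat.div_lt_iff_lt_mul (Nat.two_pow_pos _)]
        calc acc * 64 + v < 2 ^ (nbits + 6) := hlt
          _ = 256 * 2 ^ (nbits - 2) := by
              rw [show nbits + 6 = 8 + (nbits - 2) from by omega, pow_add]
              norm_num
      rw [hstep, ih h' _ _ _ (Nat.mod_lt _ (Nat.two_pow_pos _)) (by omega), List.append_assoc,
        hsplit, List.append_assoc, chunk8_append _ _ (natBits_length 8 _),
        byteOf_natBits _ hq, List.singleton_append]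
    · -- bits are only buffered
      have hstep : bstep (acc, nbits, out) v = (acc * 64 + v, nbits + 6, out) := by
        simp only [bstep]
        rw [if_neg (by omega)]
      rw [hstep, ih h' _ _ _ hlt (by omega)]

-- f"{v:06b}" for a sextet is its 6 bits as '0'/'1' characters
theorem zfill6_eq_bits (v : Nat) (hv : v < 64) :
    PySem.Chars.zfill (PySem.Int.toBinChars (v : Int)) 6 = (bits6 v).map bitChar := by
  interval_cases v <;> rfl

-- int(chunk, 2) on 8 binary characters is the byte value
theorem parse8 (u : List Bool) (hu : u.length = 8) :
    PySem.Int.ofCharsBase? (u.map bitChar) 2 = some ((byteOf u : Nat) : Int) := by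
  rcases u with _ | ⟨b0, _ | ⟨b1, _ | ⟨b2, _ | ⟨b3, _ | ⟨b4, _ | ⟨b5, _ | ⟨b6, _ | ⟨b7, _ | ⟨b8, u⟩⟩⟩⟩⟩⟩⟩⟩⟩ <;>
    simp_all
  cases b0 <;> cases b1 <;> cases b2 <;> cases b3 <;> cases b4 <;> cases b5 <;> cases b6 <;> cases b7 <;> rfl

theorem take8 (u r : List Bool) (m : Nat) (h : u.length = 8) :
    (u ++ r).take (8 + m) = u ++ r.take m := by
  rw [List.take_append, List.take_of_length_le (by omega), h]
  congr 2
  omega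

-- chunk8 ignores a trailing incomplete chunk
theorem chunk8_take (bs : List Bool) :
    chunk8 (bs.take (bs.length - bs.length % 8)) = chunk8 bs := by
  fun_induction chunk8 bs with
  | case1 b0 b1 b2 b3 b4 b5 b6 b7 r ih =>
    have hm : (b0::b1::b2::b3::b4::b5::b6::b7::r : List Bool).length -
        (b0::b1::b2::b3::b4::b5::b6::b7::r : List Bool).length % 8 = 8 + (r.length - r.length % 8) := by
      simp only [List.length_cons]; omega
    rw [hm, show (b0::b1::b2::b3::b4::b5::b6::b7::r : List Bool) = [b0,b1,b2,b3,b4,b5,b6,b7] ++ r from rfl,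
       take8 _ _ _ (by rfl)]
    simp only [List.cons_append, List.nil_append, chunk8]
    exact congrArg _ ih
  | case2 x hx =>
    rcases x with _|⟨a0,_|⟨a1,_|⟨a2,_|⟨a3,_|⟨a4,_|⟨a5,_|⟨a6,_|⟨a7,r⟩⟩⟩⟩⟩⟩⟩⟩
    · rfl
    all_goals first
      | exact (hx _ _ _ _ _ _ _ _ _ rfl).elim
      | simp [chunk8]

-- A's range/slice/parse pipeline on a whole number of 8-bit chunks
theorem pipeline_eq_chunk8 (k : Nat) (bs : List Bool) (hlen : bs.length = 8 * k) :
    ((PySem.List.pyRange 0 (((bs.map bitChar).length : Nat) : Int) 8).map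
        (fun i => PySem.List.slice (bs.map bitChar) (some i) (some (i + 8)))).map
      (fun ch => ((PySem.Int.ofCharsBase? ch 2).getD 0).toNat) = chunk8 bs := by
  induction k generalizing bs with
  | zero =>
    have hbs : bs = [] := List.eq_nil_of_length_eq_zero (by omega)
    subst hbs
    simp [PySem.List.pyRange_of_pos 0 0 (by norm_num : (0:Int) < 8), chunk8]
  | succ k ih =>
    have h8 : bs.length = 8 * k + 8 := by omega
    rw [List.length_map, h8]
    rw [PySem.List.pyRange_of_pos 0 _ (by norm_num : (0:Int) < 8)]
    have hcnt : (if (0:Int) < ((8 * k + 8 : Nat) : Int) then ((((8 * k + 8 : Nat) : Int) - 0 + 8 - 1) / 8).toNat else 0) = k + 1 := by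
      rw [if_pos (by push_cast; omega)]
      push_cast
      omega
    rw [hcnt, List.range_succ_eq_map]
    simp only [List.map_cons, List.map_map]
    conv_rhs => rw [← List.take_append_drop 8 bs]
    rw [chunk8_append _ _ (by rw [List.length_take]; omega)]
    congr 1
    · show ((PySem.Int.ofCharsBase? (PySem.List.slice (bs.map bitChar) (some (0 + 8 * ((0:Nat):Int))) (some (0 + 8 * ((0:Nat):Int) + 8))) 2).getD 0).toNat = byteOf (bs.take 8)
      have hs := PySem.List.slice_natCast (bs.map bitChar) 0 8
      norm_num at hs ⊢
      rw [hs, ← List.map_take, parse8 _ (by rw [List.length_take]; omega)]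
      simp
    · have ih' := ih (bs.drop 8) (by rw [List.length_drop]; omega)
      rw [List.length_map, List.length_drop, h8] at ih'
      have hcnt2 : (if (0:Int) < ((8 * k + 8 - 8 : Nat) : Int) then ((((8 * k + 8 - 8 : Nat) : Int) - 0 + 8 - 1) / 8).toNat else 0) = k := by
        rcases Nat.eq_zero_or_pos k with hk | hk
        · simp [hk]
        · rw [if_pos (by push_cast; omega)]
          push_cast
          omega
      rw [PySem.List.pyRange_of_pos 0 _ (by norm_num : (0:Int) < 8), hcnt2, List.map_map] at ih'
      rw [← ih', List.map_map]
      apply List.map_congr_left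
      intro j hj
      simp only [Function.comp_apply]
      have e1 : (0 + 8 * ((Nat.succ j : Nat) : Int)) = ((8 * j + 8 : Nat) : Int) := by push_cast; ring
      have e2 : ((8 * j + 8 : Nat) : Int) + 8 = ((8 * j + 16 : Nat) : Int) := by push_cast; ring
      have e3 : (0 + 8 * ((j : Nat) : Int)) = ((8 * j : Nat) : Int) := by push_cast; ring
      have e4 : ((8 * j : Nat) : Int) + 8 = ((8 * j + 8 : Nat) : Int) := by push_cast; ring
      rw [e1, e2, e3, e4, PySem.List.slice_natCast, PySem.List.slice_natCast]
      rw [show 8*j+16 - (8*j+8) = 8 from by omega, show 8*j+8 - 8*j = 8 from by omega]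
      congr 1
      rw [show List.drop (8*j) (List.map bitChar (List.drop 8 bs)) = List.map bitChar (List.drop (8*j+8) bs) from by rw [← List.map_drop, List.drop_drop]; ring_nf]
      rw [← List.map_drop]

-- the two ports agree on every input (on raising inputs both ports take the same fallbacks)
theorem ports_agree (s : String) : base64_to_utf8 s = base64_to_utf8_alt s := by
  simp only [base64_to_utf8, base64_to_utf8_alt, matchIdx]
  have hB : (((s.toList.reverse.dropWhile (· == '=')).reverse).foldl
      (fun st ch => bstep st ((PySem.List.index? B64 ch).getD 0)) (0, 0, ([] : List Nat))).2.2 =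
      chunk8 (((rstripEq s.toList).map (fun c => (PySem.List.index? B64 c).getD 0)).flatMap bits6) := by
    rw [show ((s.toList.reverse.dropWhile (· == '=')).reverse) = rstripEq s.toList from rfl,
      ← List.foldl_map]
    rw [fold_spec _ (by
        intro v hv'
        obtain ⟨c, -, rfl⟩ := List.mem_map.mp hv'
        exact idx_lt c) 0 0 [] (by norm_num) (by norm_num)]
    rfl
  rw [hB]
  have hbin : ((rstripEq s.toList).map (fun ch =>
      PySem.Chars.zfill (PySem.Int.toBinChars (((PySem.List.index? B64 ch).getD 0 : Nat) : Int)) 6)).flatten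
      = (((rstripEq s.toList).map (fun c => (PySem.List.index? B64 c).getD 0)).flatMap bits6).map bitChar := by
    rw [List.map_flatMap, List.flatMap_map, List.flatMap_def]
    congr 1
    apply List.map_congr_left
    intro c _
    exact zfill6_eq_bits _ (idx_lt c)
  rw [hbin]
  generalize (((rstripEq s.toList).map (fun c => (PySem.List.index? B64 c).getD 0)).flatMap bits6) = bs
  rw [List.length_map]
  rw [PySem.List.slice_to _ (by push_cast; omega : (0:Int) ≤ (bs.length : Int) - ((bs.length % 8 : Nat) : Int))]
  rw [show ((bs.length : Int) - ((bs.length % 8 : Nat) : Int)).toNat = bs.length - bs.length % 8 from by omega]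
  rw [← List.map_take]
  rw [pipeline_eq_chunk8 ((bs.length - bs.length % 8) / 8) _ (by rw [List.length_take]; omega)]
  rw [chunk8_take]

-- ===== VERDICT (by name: the statement is the Claim_ definition above) =====
theorem base64_to_utf8_spec : Claim_equal_base64_to_utf8 := by
  intro s _ _
  unfold Spec_base64_to_utf8
  exact ports_agree s
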